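-- pv_equiv track=rewrite | github.com/desjoao/BeeCrowd | 1024.py | terceira_passada
-- ===== SOURCE A (Python) =====
-- def terceira_passada(string: str) -> str:
--     saida = ''
--     string = list(string)
--     for i in range(0, len(string)):
--         if i < len(string)//2:
--             saida+=string[i]
--             continue
--         valor = ord(string[i]) - 1
--         char = chr(valor)
--         saida+=char
--     return saida
-- ===== SOURCE B (Python) =====
-- def terceira_passada(string: str) -> str:
--     mid = len(string) // 2
--     return string[:mid] + ''.join(chr(ord(c) - 1) for c in string[mid:])
-- ===== Notes on version B (the rewrite author's own statement) =====
-- stated objective: simpler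
-- what changed: Replaces the single indexed loop with a per-index branch by an up-front partition at mid = len//2: the prefix is kept as an unmodified slice and only the suffix is mapped through chr(ord(c)-1), joined once.
import Mathlib
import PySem

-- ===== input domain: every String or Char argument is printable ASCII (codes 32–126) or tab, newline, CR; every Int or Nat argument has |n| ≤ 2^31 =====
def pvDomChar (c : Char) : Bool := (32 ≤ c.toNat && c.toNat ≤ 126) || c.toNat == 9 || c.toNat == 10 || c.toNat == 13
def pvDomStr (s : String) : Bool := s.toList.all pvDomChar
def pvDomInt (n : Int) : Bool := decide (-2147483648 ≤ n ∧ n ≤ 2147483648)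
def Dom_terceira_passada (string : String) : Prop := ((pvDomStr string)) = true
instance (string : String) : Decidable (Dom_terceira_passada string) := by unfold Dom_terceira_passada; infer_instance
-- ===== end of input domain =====

-- B keeps the first half by slicing and maps chr(ord(c)-1) over the suffix only,
-- instead of A's single indexed loop testing i < len//2 at every character (objective: simpler).

-- ===== PORT A =====
-- A: one loop over indices, appending either the original char or the shifted char.
def terceira_passada (string : String) : String :=
  let s := string.toList
  let saida := (List.range s.length).foldl (fun saida i =>
    if i < s.length / 2 then
      saida ++ [s.getD i ' ']
    else
      saida ++ [Char.ofNat (s.getD i ' ').toNat.pred]) []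
  String.mk saida

-- ===== PORT B =====
-- B: partition at mid, shift only the suffix.
def terceira_passada_alt (string : String) : String :=
  let s := string.toList
  let mid := s.length / 2
  String.mk (s.take mid ++ (s.drop mid).map (fun c => Char.ofNat c.toNat.pred))

-- ===== PRECONDITION & SPEC =====
def Spec_terceira_passada (string : String) (out : String) : Prop := out = terceira_passada_alt string
instance (string : String) (out : String) : Decidable (Spec_terceira_passada string out) := by unfold Spec_terceira_passada; infer_instance

-- ===== CLAIM (what is proved, stated in full; the proofs are below) =====
def Claim_equal_terceira_passada : Prop := ∀ (string : String), Dom_terceira_passada string → Spec_terceira_passada string (terceira_passada string)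

-- ===== LEMMAS AND PROOFS =====

theorem pv_foldl_range_append {α : Type} (g : Nat → α) :
    ∀ (n : Nat) (acc : List α),
      (List.range n).foldl (fun a i => a ++ [g i]) acc = acc ++ (List.range n).map g := by
  intro n
  induction n with
  | zero => intro acc; simp
  | succ n ih =>
    intro acc
    simp [List.range_succ, ih]

-- ===== VERDICT (by name: the statement is the Claim_ definition above) =====
theorem terceira_passada_spec : Claim_equal_terceira_passada := by
  intro string _
  unfold Spec_terceira_passada terceira_passada terceira_passada_alt
  set s := string.toList with hs
  have hf : (fun (a : List Char) i =>
      if i < s.length / 2 then a ++ [s.getD i ' ']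
      else a ++ [Char.ofNat (s.getD i ' ').toNat.pred]) =
      fun a i => a ++ [if i < s.length / 2 then s.getD i ' '
        else Char.ofNat (s.getD i ' ').toNat.pred] := by
    funext a i; split <;> rfl
  simp only [hf, pv_foldl_range_append, List.nil_append]
  congr 1
  apply List.ext_getElem
  · simp [Nat.div_le_self, Nat.add_sub_cancel' (Nat.div_le_self s.length 2)]
  · intro i h1 h2
    have hlen : i < s.length := by simpa using h1
    by_cases hi : i < s.length / 2
    · rw [List.getElem_map, List.getElem_range,
        List.getElem_append_left (by simpa [Nat.min_eq_left (Nat.div_le_self s.length 2)] using hi)]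
      simp [hi, List.getElem_take, List.getD_eq_getElem?_getD, List.getElem?_eq_getElem hlen]
    · rw [List.getElem_map, List.getElem_range]
      have hmin : (s.take (s.length / 2)).length = s.length / 2 := by
        simp [Nat.min_eq_left (Nat.div_le_self s.length 2)]
      rw [List.getElem_append_right (by omega)]
      simp [hi, hmin, List.getElem_drop, List.getD_eq_getElem?_getD,
        List.getElem?_eq_getElem hlen, Nat.add_sub_cancel' (Nat.not_lt.mp hi)]
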